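-- pv_equiv track=rewrite | github.com/cyril0369/logistique_msb_project | Poules.py | creer_poules
-- ===== SOURCE A (Python) =====
-- from typing import List, Dict
--
-- def creer_poules(equipes: List[Dict], max_par_poule: int = 2) -> Dict: #on demande le max à l'utilisateur ?
--     # 1. Regrouper les équipes par sport
--     sports = {}
--     for e in equipes:
--         sport = e["sport"]
--         if sport not in sports:
--             sports[sport] = []
--         sports[sport].append(e)
--
--     # 2. Créer les poules par sport
--     resultats = {}
--
--     for sport, eqs in sports.items():
--         nb_equipes = len(eqs)
--
--         # Calculer le nb_poules nécessaires
--         nb_poules = (nb_equipes + max_par_poule - 1) // max_par_poule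
--
--         # Initialiser
--         poules = [[] for _ in range(nb_poules)]
--
--         # 3. Répartir les éqs de manière équilibrée
--         for i, equipe in enumerate(eqs):
--             index_poule = i % nb_poules
--             poules[index_poule].append(equipe)
--
--         resultats[sport] = poules
--
--     return resultats
-- ===== SOURCE B (Python) =====
-- from typing import List, Dict
--
-- def creer_poules(equipes: List[Dict], max_par_poule: int = 2) -> Dict:
--     # Group teams by sport (first-seen order), then build each sport's pools by
--     # strided slicing instead of an index/modulo distribution loop.
--     sports = {}
--     for e in equipes:
--         sports.setdefault(e["sport"], []).append(e)
--     return {sport: _poules(eqs, max_par_poule) for sport, eqs in sports.items()}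
--
-- def _poules(eqs, max_par_poule):
--     nb_poules = (len(eqs) + max_par_poule - 1) // max_par_poule
--     return [eqs[j::nb_poules] for j in range(nb_poules)]
-- ===== Notes on version B (the rewrite author's own statement) =====
-- stated objective: alternative
-- what changed: B keeps the grouping pass (via dict.setdefault) but replaces A's enumerate/modulo distribution loop that mutates pool lists in place by building each pool directly as a strided slice eqs[j::nb_poules], assembled with a dict comprehension.
import Mathlib
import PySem

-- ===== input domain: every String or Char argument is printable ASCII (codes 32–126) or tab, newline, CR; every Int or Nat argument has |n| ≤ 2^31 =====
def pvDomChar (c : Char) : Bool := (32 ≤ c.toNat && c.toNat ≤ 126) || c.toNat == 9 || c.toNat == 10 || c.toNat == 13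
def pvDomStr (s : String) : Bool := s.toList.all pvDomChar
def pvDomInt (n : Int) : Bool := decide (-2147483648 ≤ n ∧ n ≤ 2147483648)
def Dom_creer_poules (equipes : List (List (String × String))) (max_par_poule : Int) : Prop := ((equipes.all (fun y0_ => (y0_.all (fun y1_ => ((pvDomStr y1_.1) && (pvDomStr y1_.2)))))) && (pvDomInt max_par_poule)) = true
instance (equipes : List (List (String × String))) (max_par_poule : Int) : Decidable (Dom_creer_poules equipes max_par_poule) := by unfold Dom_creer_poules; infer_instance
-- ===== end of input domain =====

-- B builds each sport's pools by strided slicing (eqs[j::nb]) instead of A's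
-- enumerate/modulo distribution loop; objective: alternative (same cost).


-- shared helper: e["sport"]  (KeyError — key absent — is excluded by Pre_)
def pvSport (e : List (String × String)) : String :=
  (PySem.Dict.mk e).getD "sport" ""

-- ===== PORT A =====
def creer_poules (equipes : List (List (String × String))) (max_par_poule : Int) : List (String × List (List (List (String × String)))) :=
  -- 1. group the teams by sport
  let sports : PySem.Dict String (List (List (String × String))) :=
    equipes.foldl (fun d e =>
      let sport := pvSport e
      let d := if d.contains sport then d else d.insert sport []   -- if sport not in sports: sports[sport] = []
      d.modify sport [] (fun l => l ++ [e])) PySem.Dict.empty      -- sports[sport].append(e)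
  -- 2. build the pools per sport
  let resultats : PySem.Dict String (List (List (List (String × String)))) :=
    sports.items.foldl (fun res sp_eqs =>
      let eqs := sp_eqs.2
      let nb_equipes : Int := eqs.length
      let nb_poules := PySem.Int.floordiv (nb_equipes + max_par_poule - 1) max_par_poule
      let poules : List (List (List (String × String))) :=
        (PySem.List.pyRange 0 nb_poules 1).map (fun _ => [])       -- [[] for _ in range(nb_poules)]
      -- 3. distribute the teams round-robin
      let poules := (PySem.List.enumerate eqs 0).foldl (fun ps ie =>
        let index_poule := PySem.Int.mod ie.1 nb_poules            -- i % nb_poules; ZeroDivisionError excluded by Pre_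
        -- poules[index_poule].append(equipe); IndexError (nb_poules < 0) excluded by Pre_
        PySem.List.pySetD ps index_poule (PySem.List.pyGetD ps index_poule [] ++ [ie.2])) poules
      res.insert sp_eqs.1 poules) PySem.Dict.empty
  resultats.items

-- ===== PORT B =====
-- helper _poules: pools as strided slices [eqs[j::nb_poules] for j in range(nb_poules)]
def pvPoulesSlices (eqs : List (List (String × String))) (max_par_poule : Int) : List (List (List (String × String))) :=
  let nb_poules := PySem.Int.floordiv ((eqs.length : Int) + max_par_poule - 1) max_par_poule
  (PySem.List.pyRange 0 nb_poules 1).map (fun j =>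
    (PySem.List.slice? eqs (some j) none nb_poules).getD [])      -- step 0 (ValueError) excluded by Pre_

def creer_poules_alt (equipes : List (List (String × String))) (max_par_poule : Int) : List (String × List (List (List (String × String)))) :=
  let sports : PySem.Dict String (List (List (String × String))) :=
    equipes.foldl (fun d e =>
      (d.setdefault (pvSport e) []).modify (pvSport e) [] (fun l => l ++ [e]))  -- sports.setdefault(e["sport"], []).append(e)
      PySem.Dict.empty
  -- {sport: _poules(eqs, max_par_poule) for sport, eqs in sports.items()}
  (sports.items.foldl (fun r sp_eqs => r.insert sp_eqs.1 (pvPoulesSlices sp_eqs.2 max_par_poule)) PySem.Dict.empty).items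

-- ===== PRECONDITION & SPEC =====
-- Pre_ excludes exactly the inputs where A raises: a team without the "sport" key (KeyError),
-- max_par_poule = 0 (ZeroDivisionError), and max_par_poule < 0 together with some sport having
-- two or more teams (nb_poules ≤ 0 there, so i % nb_poules raises ZeroDivisionError/IndexError);
-- with max_par_poule < 0 and all sports distinct, or with no teams at all, A returns normally
-- and stays inside Pre_.
def Pre_creer_poules (equipes : List (List (String × String))) (max_par_poule : Int) : Prop :=
  (∀ e ∈ equipes, (PySem.Dict.mk e).contains "sport" = true) ∧
  (1 ≤ max_par_poule ∨ (max_par_poule ≤ -1 ∧ (equipes.map pvSport).Nodup) ∨ equipes = [])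
instance (equipes : List (List (String × String))) (max_par_poule : Int) : Decidable (Pre_creer_poules equipes max_par_poule) := by unfold Pre_creer_poules; infer_instance

def pvWitness_creer_poules : (List (List (String × String))) × Int :=
  ([[("sport", "foot"), ("nom", "A")], [("sport", "foot"), ("nom", "B")], [("sport", "volley"), ("nom", "C")]], 2)

def Spec_creer_poules (equipes : List (List (String × String))) (max_par_poule : Int) (out : List (String × List (List (List (String × String))))) : Prop := out = creer_poules_alt equipes max_par_poule
instance (equipes : List (List (String × String))) (max_par_poule : Int) (out : List (String × List (List (List (String × String))))) : Decidable (Spec_creer_poules equipes max_par_poule out) := by unfold Spec_creer_poules; infer_instance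

-- ===== CLAIM (what is proved, stated in full; the proofs are below) =====
def Claim_equal_creer_poules : Prop := ∀ (equipes : List (List (String × String))) (max_par_poule : Int), Dom_creer_poules equipes max_par_poule → Pre_creer_poules equipes max_par_poule → Spec_creer_poules equipes max_par_poule (creer_poules equipes max_par_poule)


-- ===== LEMMAS AND PROOFS =====

-- the list of elements of xs whose index is ≡ j (mod nb)
def pvStrided {α : Type} (xs : List α) (j nb : Nat) : List α :=
  (xs.zipIdx.filter (fun p => p.2 % nb = j)).map Prod.fst

theorem pvStrided_append {α : Type} (xs : List α) (x : α) (j nb : Nat) :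
    pvStrided (xs ++ [x]) j nb
      = pvStrided xs j nb ++ (if xs.length % nb = j then [x] else []) := by
  unfold pvStrided
  rw [List.zipIdx_append]
  simp [List.filter_append]
  split <;> simp_all

theorem pvStrided_eq_nil {α : Type} (xs : List α) (j nb : Nat) (h : xs.length ≤ j) (hj : j < nb) :
    pvStrided xs j nb = [] := by
  unfold pvStrided
  rw [List.filter_eq_nil_iff.mpr, List.map_nil]
  intro p hp
  have h2 := List.snd_lt_add_of_mem_zipIdx hp
  simp at h2
  have h3 : p.2 % nb = p.2 := Nat.mod_eq_of_lt (by omega)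
  simp [h3]
  omega

-- content of the strided slice, Nat level
theorem pvStride_eq {α : Type} (nb : Nat) (h : 0 < nb) (xs : List α) (j : Nat)
    (hj : j < nb) (hn : j < xs.length) :
    (List.range ((xs.length - j + nb - 1) / nb)).filterMap (fun k => xs[j + nb * k]?)
      = pvStrided xs j nb := by
  induction xs using List.reverseRecOn with
  | nil => simp at hn
  | append_singleton xs x IH =>
    rw [pvStrided_append]
    have hlen : (xs ++ [x]).length = xs.length + 1 := by simp
    by_cases hjn : j = xs.length
    · subst hjn
      rw [pvStrided_eq_nil xs _ nb (le_refl _) hj]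
      rw [hlen, show xs.length + 1 - xs.length + nb - 1 = nb by omega, Nat.div_self h]
      simp [Nat.mod_eq_of_lt hj]
    · have hjn' : j < xs.length := by omega
      have IH' := IH hjn'
      have hdvd_iff : nb ∣ (xs.length - j + nb) ↔ xs.length % nb = j := by
        rw [Nat.dvd_add_self_right]
        rw [← Nat.modEq_iff_dvd' (le_of_lt hjn')]
        unfold Nat.ModEq
        rw [Nat.mod_eq_of_lt hj]
        exact eq_comm
      by_cases hmod : xs.length % nb = j
      · have hdvd : nb ∣ xs.length - j := by
          have := hdvd_iff.mpr hmod
          exact Nat.dvd_add_self_right.mp this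
        have hq := Nat.div_mul_cancel hdvd
        set q := (xs.length - j) / nb with hqdef
        have hq2 : nb * q = xs.length - j := by rw [Nat.mul_comm nb q]; exact hq
        have hnq : xs.length = j + nb * q := by omega
        have hc : (xs.length - j + nb - 1) / nb = q := by
          rw [show xs.length - j + nb - 1 = nb * q + (nb - 1) by omega]
          rw [Nat.mul_add_div h, Nat.div_eq_of_lt (by omega : nb - 1 < nb)]
          omega
        have hc' : ((xs ++ [x]).length - j + nb - 1) / nb = q + 1 := by
          have hexp : nb * (q + 1) = nb * q + nb := by ring
          rw [hlen, show xs.length + 1 - j + nb - 1 = nb * (q + 1) by omega]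
          exact Nat.mul_div_cancel_left _ h
        rw [hc', List.range_succ, List.filterMap_append]
        congr 1
        · rw [← IH', hc]
          apply List.filterMap_congr
          intro k hk
          have hk' : k < q := List.mem_range.mp hk
          have hmul : nb * (k + 1) ≤ nb * q := Nat.mul_le_mul_left nb hk'
          have hexp : nb * (k + 1) = nb * k + nb := by ring
          have : j + nb * k < xs.length := by omega
          rw [List.getElem?_append_left this]
        · simp only [List.filterMap_cons, List.filterMap_nil, hmod, if_true]
          rw [show j + nb * q = xs.length by omega, List.getElem?_concat_length]
      · have hc' : ((xs ++ [x]).length - j + nb - 1) / nb = (xs.length - j + nb - 1) / nb := by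
          rw [hlen, show xs.length + 1 - j + nb - 1 = (xs.length - j + nb - 1) + 1 by omega,
            Nat.succ_div, show xs.length - j + nb - 1 + 1 = xs.length - j + nb by omega]
          simp [hdvd_iff, hmod]
        rw [hc', ← IH']
        simp only [hmod, if_false, List.append_nil]
        apply List.filterMap_congr
        intro k hk
        have hk' : k < (xs.length - j + nb - 1) / nb := List.mem_range.mp hk
        have hle : ((xs.length - j + nb - 1) / nb) * nb ≤ xs.length - j + nb - 1 :=
          Nat.div_mul_le_self _ _
        have hmul : nb * (k + 1) ≤ nb * ((xs.length - j + nb - 1) / nb) := Nat.mul_le_mul_left nb hk'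
        have hexp : nb * (k + 1) = nb * k + nb := by ring
        have hcm : nb * ((xs.length - j + nb - 1) / nb) = ((xs.length - j + nb - 1) / nb) * nb := by ring
        have : j + nb * k < xs.length := by omega
        rw [List.getElem?_append_left this]

-- eqs[j::nb] is exactly the strided sublist
theorem pvSlice?_strided {α : Type} (xs : List α) (j nb : Nat) (h : 0 < nb) (hj : j < nb) :
    PySem.List.slice? xs (some (j : Int)) none (nb : Int) = some (pvStrided xs j nb) := by
  have hnb0 : (nb : Int) ≠ 0 := by exact_mod_cast h.ne'
  have hnblt : ¬ ((nb : Int) < 0) := not_lt.mpr (Int.natCast_nonneg nb)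
  have h2 : ¬ ((j : Int) < 0) := not_lt.mpr (Int.natCast_nonneg j)
  rw [PySem.List.slice?]
  simp only [if_neg hnb0, PySem.List.sliceIndices, hnblt, if_false, h2]
  have hpos : (0:Int) < (nb:Int) := by exact_mod_cast h
  rw [if_pos hpos]
  by_cases hjn : j < xs.length
  · have hmin : min (j:Int) (xs.length:Int) = (j:Int) := min_eq_left (by exact_mod_cast hjn.le)
    have hlt : (j:Int) < (xs.length:Int) := by exact_mod_cast hjn
    rw [hmin, if_pos hlt]
    have hcast : ((xs.length:Int) - j + nb - 1) = ((xs.length - j + nb - 1 : Nat) : Int) := by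
      omega
    have hcount : (((xs.length:Int) - j + nb - 1)) / (nb:Int) = ((xs.length - j + nb - 1) / nb : Nat) := by
      rw [hcast]; omega
    rw [hcount, Int.toNat_natCast, ← pvStride_eq nb h xs j hj hjn]
    congr 1
  · have hge : xs.length ≤ j := not_lt.mp hjn
    have hmin : min (j:Int) (xs.length:Int) = (xs.length:Int) := min_eq_right (by exact_mod_cast hge)
    rw [hmin, if_neg (lt_irrefl _), pvStrided_eq_nil xs j nb hge hj]
    simp

-- A's distribution loop computes the strided sublists
theorem pvFoldA {α : Type} (nb : Nat) (h : 0 < nb) (eqs : List α) :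
    (PySem.List.enumerate eqs 0).foldl (fun ps ie =>
        PySem.List.pySetD ps (PySem.Int.mod ie.1 (nb : Int))
          (PySem.List.pyGetD ps (PySem.Int.mod ie.1 (nb : Int)) [] ++ [ie.2]))
      ((List.range nb).map (fun _ => ([] : List α)))
      = (List.range nb).map (fun j => pvStrided eqs j nb) := by
  induction eqs using List.reverseRecOn with
  | nil =>
    simp [PySem.List.enumerate_nil, pvStrided, List.map_const']
  | append_singleton xs x IH =>
    rw [PySem.List.enumerate_append, List.foldl_append, IH]
    simp only [PySem.List.enumerate_cons, PySem.List.enumerate_nil, List.foldl_cons, List.foldl_nil,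
      zero_add]
    have hm : PySem.Int.mod ((xs.length : Int)) (nb : Int) = ((xs.length % nb : Nat) : Int) :=
      PySem.Int.mod_natCast _ _
    have hlt : xs.length % nb < nb := Nat.mod_lt _ h
    have hget : PySem.List.pyGetD ((List.range nb).map (fun j => pvStrided xs j nb)) ((xs.length % nb : Nat) : Int) [] = pvStrided xs (xs.length % nb) nb := by
      rw [PySem.List.pyGetD_natCast]
      rw [List.getD_eq_getElem _ _ (by simpa using hlt)]
      simp
    have hset : ∀ (v : List α), PySem.List.pySetD ((List.range nb).map (fun j => pvStrided xs j nb)) ((xs.length % nb : Nat) : Int) v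
        = ((List.range nb).map (fun j => pvStrided xs j nb)).set (xs.length % nb) v := by
      intro v
      rw [PySem.List.pySetD, PySem.List.pySet?_natCast _ _ _ (by simpa using hlt)]
      rfl
    rw [hm, hget, hset]
    apply List.ext_getElem
    · simp
    · intro p h1 h2
      rw [List.getElem_set]
      simp only [List.getElem_map, List.getElem_range]
      have hp : p < nb := by simpa using h2
      rw [pvStrided_append]
      by_cases hpm : xs.length % nb = p
      · rw [if_pos (by omega), if_pos hpm, hpm]
      · rw [if_neg (by omega), if_neg hpm, List.append_nil]

-- per-sport pools agree whenever nb_poules ≥ 1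
theorem pvPools_eq (eqs : List (List (String × String))) (m : Int)
    (h : 1 ≤ PySem.Int.floordiv ((eqs.length : Int) + m - 1) m) :
    (PySem.List.enumerate eqs 0).foldl (fun ps ie =>
        PySem.List.pySetD ps (PySem.Int.mod ie.1 (PySem.Int.floordiv ((eqs.length : Int) + m - 1) m))
          (PySem.List.pyGetD ps (PySem.Int.mod ie.1 (PySem.Int.floordiv ((eqs.length : Int) + m - 1) m)) [] ++ [ie.2]))
      ((PySem.List.pyRange 0 (PySem.Int.floordiv ((eqs.length : Int) + m - 1) m) 1).map (fun _ => []))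
      = pvPoulesSlices eqs m := by
  set nbI := PySem.Int.floordiv ((eqs.length : Int) + m - 1) m with hnbI
  have hz : pvPoulesSlices eqs m
      = (PySem.List.pyRange 0 nbI 1).map (fun j => (PySem.List.slice? eqs (some j) none nbI).getD []) := rfl
  rw [hz]
  have hcast : nbI = ((nbI.toNat : Nat) : Int) := by omega
  set nb := nbI.toNat with hnb
  have hpos : 0 < nb := by omega
  rw [hcast, PySem.List.pyRange_zero_nat, List.map_map, List.map_map]
  rw [show ((fun _ => ([] : List (List (String × String)))) ∘ (fun (k : Nat) => (k : Int)))
      = (fun (_ : Nat) => ([] : List (List (String × String)))) from rfl]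
  rw [pvFoldA nb hpos eqs]
  apply List.map_congr_left
  intro j hj
  have hjlt : j < nb := List.mem_range.mp hj
  simp only [Function.comp_apply]
  rw [pvSlice?_strided eqs j nb hpos hjlt]
  rfl

-- the grouping step of both ports, reduced to a single Dict.modify
theorem pvGroupStepA (d : PySem.Dict String (List (List (String × String)))) (e : List (String × String)) :
    (if d.contains (pvSport e) then d else d.insert (pvSport e) []).modify (pvSport e) [] (fun l => l ++ [e])
      = d.modify (pvSport e) [] (fun l => l ++ [e]) := by
  by_cases hc : d.contains (pvSport e) = true
  · rw [if_pos hc]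
  · rw [if_neg hc, PySem.Dict.modify, PySem.Dict.getD_insert_self, PySem.Dict.insert_insert_self,
      PySem.Dict.modify, PySem.Dict.getD_of_not_contains _ _ (by simpa using hc)]

theorem pvGroupStepB (d : PySem.Dict String (List (List (String × String)))) (e : List (String × String)) :
    (d.setdefault (pvSport e) []).modify (pvSport e) [] (fun l => l ++ [e])
      = d.modify (pvSport e) [] (fun l => l ++ [e]) := by
  by_cases hc : d.contains (pvSport e) = true
  · rw [PySem.Dict.setdefault_of_contains _ _ hc]
  · rw [PySem.Dict.setdefault_of_not_contains _ _ (by simpa using hc), PySem.Dict.modify,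
      PySem.Dict.getD_insert_self, PySem.Dict.insert_insert_self,
      PySem.Dict.modify, PySem.Dict.getD_of_not_contains _ _ (by simpa using hc)]

-- ===== VERDICT (by name: the statement is the Claim_ definition above) =====
theorem creer_poules_spec : Claim_equal_creer_poules := by
  intro equipes m hdom hpre
  obtain ⟨hkeys, hm⟩ := hpre
  unfold Spec_creer_poules
  simp only [creer_poules, creer_poules_alt]
  rw [PySem.List.foldl_congr_mem equipes _
      (fun d e => d.modify (pvSport e) [] (fun l => l ++ [e])) PySem.Dict.empty
      (fun d e _ => pvGroupStepA d e),
    PySem.List.foldl_congr_mem equipes _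
      (fun d e => d.modify (pvSport e) [] (fun l => l ++ [e])) PySem.Dict.empty
      (fun d e _ => pvGroupStepB d e)]
  set S := equipes.foldl (fun d e => d.modify (pvSport e) [] (fun l => l ++ [e])) PySem.Dict.empty with hSdef
  have hS : S = (equipes.map (fun e => (pvSport e, e))).foldl
      (fun d q => d.modify q.1 [] (fun l => l ++ [q.2])) PySem.Dict.empty := by
    rw [List.foldl_map]
  have hnodup : S.keys.Nodup := by
    rw [hS]
    exact PySem.Dict.nodup_keys_foldl_modify_key _ Prod.fst [] _ _ PySem.Dict.nodup_keys_empty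
  apply congrArg PySem.Dict.items
  apply PySem.List.foldl_congr_mem
  intro acc p hp
  apply congrArg (acc.insert p.1)
  -- characterise the group p.2
  have hval : p.2 = equipes.filter (fun e => pvSport e == p.1) := by
    have hv := PySem.Dict.getD_of_mem_items S (by rwa [← Prod.mk.eta (p := p)] at hp) hnodup []
    rw [hS, PySem.Dict.getD_foldl_modify_append, PySem.Dict.getD_empty, List.nil_append,
      List.filter_map, List.map_map] at hv
    rw [← hv]
    simp [Function.comp_def]
  have hmem : p.1 ∈ equipes.map pvSport := by
    have hk := PySem.Dict.mem_keys_of_mem_items S hp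
    rw [hS, PySem.Dict.keys_foldl_modify_key, PySem.Dict.keys_empty, List.map_map] at hk
    rcases (PySem.Set.mem_update _ _ _).mp hk with hh | hh
    · simp at hh
    · simpa using hh
  have hne : p.2 ≠ [] := by
    obtain ⟨e, he, hsp⟩ := List.mem_map.mp hmem
    have : e ∈ equipes.filter (fun e => pvSport e == p.1) :=
      List.mem_filter.mpr ⟨he, by simp [hsp]⟩
    rw [hval]
    exact List.ne_nil_of_mem this
  have hlen : 1 ≤ (p.2.length : Int) := by
    have := List.length_pos_iff.mpr hne
    omega
  have hnb : 1 ≤ PySem.Int.floordiv ((p.2.length : Int) + m - 1) m := by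
    rcases hm with hm1 | ⟨hm1, hnd⟩ | hemp
    · rw [PySem.Int.floordiv_eq_ediv_of_pos (by omega)]
      rw [Int.le_ediv_iff_mul_le (by omega)]
      omega
    · have hcount : p.2.length ≤ 1 := by
        rw [hval, ← List.countP_eq_length_filter]
        have : List.countP (fun e => pvSport e == p.1) equipes
            = List.count p.1 (equipes.map pvSport) := by
          rw [List.count, List.countP_map]
          rfl
        rw [this]
        exact List.nodup_iff_count_le_one.mp hnd p.1
      have hlen1 : p.2.length = 1 := by omega
      have hm0 : m ≠ 0 := by omega
      have hmod : PySem.Int.mod m m = 0 := (PySem.Int.mod_eq_zero_iff_dvd m m).mpr dvd_rfl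
      have hfd := PySem.Int.floordiv_mul_add_mod m m
      rw [hmod, add_zero] at hfd
      have hone : PySem.Int.floordiv m m = 1 := by
        have := mul_right_cancel₀ hm0 (by rw [hfd, one_mul] : PySem.Int.floordiv m m * m = 1 * m)
        exact this
      rw [show ((p.2.length : Int) + m - 1) = m by omega, hone]
    · subst hemp
      simp at hmem
  exact pvPools_eq p.2 m hnb
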